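-- pv_equiv track=rewrite | github.com/Faizanmedico/Python-Program-to-print-pattern-of-SULTAN | pro2.py | get_l_pattern
-- ===== SOURCE A (Python) =====
-- def get_l_pattern(n):
--     """Returns the 'L' pattern as a list of strings."""
--     pattern = []
--     for row in range(n):
--         line = ""
--         for col in range(n):
--             if col == 0 or row == n - 1:
--                 line += "*"
--             else:
--                 line += " "
--         pattern.append(line)
--     return pattern
-- ===== SOURCE B (Python) =====
-- def get_l_pattern(n):
--     """Returns the 'L' pattern as a list of strings."""
--     if n <= 0:
--         return []
--     return ["*" + " " * (n - 1)] * (n - 1) + ["*" * n]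
-- ===== Notes on version B (the rewrite author's own statement) =====
-- stated objective: simpler
-- what changed: Replaces the nested per-cell branch-and-concatenate loops with a closed form: the first n-1 rows are one replicated string '*'+' '*(n-1) and the last row is '*'*n.
import Mathlib
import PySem

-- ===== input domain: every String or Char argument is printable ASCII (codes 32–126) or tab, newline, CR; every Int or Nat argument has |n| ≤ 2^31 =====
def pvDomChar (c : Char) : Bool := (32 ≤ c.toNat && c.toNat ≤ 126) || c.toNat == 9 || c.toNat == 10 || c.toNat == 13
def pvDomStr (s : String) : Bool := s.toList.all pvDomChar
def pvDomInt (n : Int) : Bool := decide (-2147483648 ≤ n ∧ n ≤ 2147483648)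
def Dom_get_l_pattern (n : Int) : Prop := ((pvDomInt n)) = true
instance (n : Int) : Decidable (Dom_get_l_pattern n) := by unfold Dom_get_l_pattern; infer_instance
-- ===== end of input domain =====

-- B replaces the nested per-cell branch-and-concatenate loops by a closed form per row
-- (first n-1 rows are one replicated string, the last row is n stars); objective: simpler.

-- ===== PORT A =====
def get_l_pattern (n : Int) : List String :=
  (PySem.List.pyRange 0 n 1).foldl (fun pattern row =>
    pattern ++ [ (PySem.List.pyRange 0 n 1).foldl (fun line col =>
        line ++ (if col = 0 ∨ row = n - 1 then "*" else " ")) "" ]) []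

-- ===== PORT B =====
def get_l_pattern_alt (n : Int) : List String :=
  if n ≤ 0 then []
  else
    List.replicate (n - 1).toNat ("*" ++ String.ofList (List.replicate (n - 1).toNat ' '))
      ++ [String.ofList (List.replicate n.toNat '*')]

-- ===== PRECONDITION & SPEC =====
def Spec_get_l_pattern (n : Int) (out : List String) : Prop := out = get_l_pattern_alt n
instance (n : Int) (out : List String) : Decidable (Spec_get_l_pattern n out) := by unfold Spec_get_l_pattern; infer_instance

-- ===== CLAIM (what is proved, stated in full; the proofs are below) =====
def Claim_equal_get_l_pattern : Prop := ∀ (n : Int), Dom_get_l_pattern n → Spec_get_l_pattern n (get_l_pattern n)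

-- ===== LEMMAS AND PROOFS =====

-- appending one fixed char per element of L to a string
theorem foldl_append_char {α : Type} (L : List α) (c : Char) (s : String) :
    L.foldl (fun l _ => l ++ String.ofList [c]) s = s ++ String.ofList (List.replicate L.length c) := by
  induction L generalizing s with
  | nil => apply String.toList_inj.mp; simp
  | cons x xs ih =>
      simp only [List.foldl_cons, ih, List.length_cons, List.replicate_succ]
      apply String.toList_inj.mp; simp

-- the line A builds for the last row: n stars
theorem lineA_last (n : Int) (hn : 0 < n) :
    (PySem.List.pyRange 0 n 1).foldl (fun line col =>
        line ++ (if col = 0 ∨ (n - 1 : Int) = n - 1 then "*" else " ")) ""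
      = String.ofList (List.replicate n.toNat '*') := by
  have h : (PySem.List.pyRange 0 n 1).foldl (fun line col =>
        line ++ (if col = 0 ∨ (n - 1 : Int) = n - 1 then "*" else " ")) ""
      = (PySem.List.pyRange 0 n 1).foldl (fun l _ => l ++ String.ofList ['*']) "" := by
    apply List.foldl_ext
    intro a b _; simp
  rw [h, foldl_append_char]
  have hl : (PySem.List.pyRange 0 n 1).length = n.toNat := by
    rw [PySem.List.length_pyRange_one]; omega
  rw [hl]
  apply String.toList_inj.mp; simp

-- the line A builds for a non-last row: a star then n-1 spaces
theorem lineA_mid (n row : Int) (hn : 0 < n) (hrow : row ≠ n - 1) :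
    (PySem.List.pyRange 0 n 1).foldl (fun line col =>
        line ++ (if col = 0 ∨ row = n - 1 then "*" else " ")) ""
      = "*" ++ String.ofList (List.replicate (n - 1).toNat ' ') := by
  rw [PySem.List.pyRange_one_cons (by omega : (0:Int) < n)]
  simp only [List.foldl_cons, true_or, if_true]
  have h : (PySem.List.pyRange (0 + 1) n 1).foldl (fun line col =>
        line ++ (if col = 0 ∨ row = n - 1 then "*" else " ")) ("" ++ "*")
      = (PySem.List.pyRange (0 + 1) n 1).foldl (fun l _ => l ++ String.ofList [' ']) ("" ++ "*") := by
    apply List.foldl_ext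
    intro a b hb
    have hb' := (PySem.List.mem_pyRange_one).1 hb
    have hne : ¬ (b = 0 ∨ row = n - 1) := by
      rintro (h0 | h1)
      · omega
      · exact hrow h1
    rw [if_neg hne]
  rw [h, foldl_append_char]
  have hl : (PySem.List.pyRange (0 + 1) n 1).length = (n - 1).toNat := by
    rw [PySem.List.length_pyRange_one]; norm_num
  rw [hl]
  apply String.toList_inj.mp; simp

theorem get_l_pattern_eq (n : Int) : get_l_pattern n = get_l_pattern_alt n := by
  unfold get_l_pattern get_l_pattern_alt
  by_cases hn : n ≤ 0
  · rw [if_pos hn, PySem.List.pyRange_one_eq_nil (by omega)]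
    rfl
  · rw [if_neg hn]
    replace hn : 0 < n := by omega
    rw [PySem.List.foldl_append_singleton_eq_map]
    -- abstract the per-row line function so only the OUTER range gets rewritten
    generalize hg : (fun row => (PySem.List.pyRange 0 n 1).foldl (fun line col =>
        line ++ (if col = 0 ∨ row = n - 1 then "*" else " ")) "") = g
    have hg_mid : ∀ row ∈ PySem.List.pyRange 0 (n - 1) 1,
        g row = "*" ++ String.ofList (List.replicate (n - 1).toNat ' ') := by
      intro row hrow
      have hrow' := (PySem.List.mem_pyRange_one).1 hrow
      rw [← hg]
      exact lineA_mid n row hn (by omega)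
    have hg_last : g (n - 1) = String.ofList (List.replicate n.toNat '*') := by
      rw [← hg]; exact lineA_last n hn
    rw [PySem.List.pyRange_one_append 0 (n - 1) n (by omega) (by omega)]
    have hsing : PySem.List.pyRange (n - 1) n 1 = [n - 1] := by
      have h := PySem.List.pyRange_one_singleton (a := n - 1)
      simpa using h
    rw [hsing, List.map_append, List.map_cons, List.map_nil, List.nil_append,
        List.map_congr_left hg_mid, List.map_const', PySem.List.length_pyRange_one, hg_last]
    norm_num

-- ===== VERDICT (by name: the statement is the Claim_ definition above) =====
theorem get_l_pattern_spec : Claim_equal_get_l_pattern := by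
  intro n _
  exact get_l_pattern_eq n
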